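-- pv_equiv track=rewrite | github.com/pikajojo/scripting-programming | ExecrisePython_2/IteratingOverLists.py | generate_list_power_minus_2
-- ===== SOURCE A (Python) =====
-- def generate_list_power_minus_2(elements):
--     # result = []
--     # if elements <= 0:
--     #     return result
--     #
--     # result.append(1)
--     # current = 1
--     #
--     # i = 1
--     # while i < elements:
--     #     current *= -2
--     #     result.append(current)
--     #     i += 1
--     # return result
--
--     result = []
--     # 首先考虑边界条件
--     # first consider the edge situations like 0
--     if elements <= 0:
--         return result
--
--     # 其次把第一个数字先放进去
--     # put the first number in the list
--     result.append(1)
--     current = 1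
--
--     # 利用for循环来实现不停连续乘-2的效果
--     # use for loop to achieve the effect of times -2 consistently
--     for i in range(1, elements):
--         current *= -2
--         result.append(current)
--     return result
-- ===== SOURCE B (Python) =====
-- def generate_list_power_minus_2(elements):
--     return [(-2) ** i for i in range(elements)]
-- ===== Notes on version B (the rewrite author's own statement) =====
-- stated objective: simpler
-- what changed: Replaces the guarded loop with a running product accumulator by a one-line comprehension computing each element independently as the closed form (-2)**i.
import Mathlib
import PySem

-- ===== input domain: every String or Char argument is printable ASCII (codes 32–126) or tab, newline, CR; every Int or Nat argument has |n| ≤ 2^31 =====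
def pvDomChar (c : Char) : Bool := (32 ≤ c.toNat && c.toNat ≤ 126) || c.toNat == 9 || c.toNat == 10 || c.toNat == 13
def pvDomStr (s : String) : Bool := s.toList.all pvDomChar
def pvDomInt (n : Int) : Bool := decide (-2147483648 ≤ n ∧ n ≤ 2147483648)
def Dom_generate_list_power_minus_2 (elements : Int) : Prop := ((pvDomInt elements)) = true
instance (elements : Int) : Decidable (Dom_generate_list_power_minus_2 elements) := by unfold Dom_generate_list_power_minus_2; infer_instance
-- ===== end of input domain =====

-- B replaces A's running-product accumulator by an independent closed-form power (-2)^i per element (simpler, same cost).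


-- ===== PORT A =====
def generate_list_power_minus_2 (elements : Int) : List Int :=
  if elements ≤ 0 then []
  else
    -- result = [1]; current = 1; for i in range(1, elements): current *= -2; result.append(current)
    ((PySem.List.pyRange 1 elements 1).foldl
      (fun (st : List Int × Int) _ => (st.1 ++ [st.2 * -2], st.2 * -2))
      ([1], 1)).1

-- ===== PORT B =====
-- [(-2)**i for i in range(elements)]; every i produced by range is ≥ 0, so (-2)**i = (-2)^i.toNat exactly
def generate_list_power_minus_2_alt (elements : Int) : List Int :=
  (PySem.List.pyRange 0 elements 1).map (fun i => (-2 : Int) ^ i.toNat)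

-- ===== PRECONDITION & SPEC =====
def Spec_generate_list_power_minus_2 (elements : Int) (out : List Int) : Prop := out = generate_list_power_minus_2_alt elements
instance (elements : Int) (out : List Int) : Decidable (Spec_generate_list_power_minus_2 elements out) := by unfold Spec_generate_list_power_minus_2; infer_instance

-- ===== CLAIM (what is proved, stated in full; the proofs are below) =====
def Claim_equal_generate_list_power_minus_2 : Prop := ∀ (elements : Int), Dom_generate_list_power_minus_2 elements → Spec_generate_list_power_minus_2 elements (generate_list_power_minus_2 elements)

-- ===== LEMMAS AND PROOFS =====

-- A's loop ignores the loop variable, so its effect only depends on the list's length.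
theorem loopA_eq (l : List Int) (r : List Int) (c : Int) :
    l.foldl (fun (st : List Int × Int) _ => (st.1 ++ [st.2 * -2], st.2 * -2)) (r, c)
      = (r ++ (List.range l.length).map (fun k => c * (-2) ^ (k + 1)), c * (-2) ^ l.length) := by
  induction l generalizing r c with
  | nil => simp
  | cons x xs ih =>
      simp only [List.foldl_cons, ih, List.length_cons, Prod.mk.injEq]
      refine ⟨?_, by ring⟩
      rw [List.append_assoc, List.singleton_append, List.range_succ_eq_map,
        List.map_cons, List.map_map]
      refine congrArg (r ++ ·) (congrArg₂ List.cons (by norm_num) ?_)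
      refine List.map_congr_left fun k _ => ?_
      simp only [Function.comp_apply, Nat.succ_eq_add_one, pow_succ]
      ring

-- ===== VERDICT (by name: the statement is the Claim_ definition above) =====
theorem generate_list_power_minus_2_spec : Claim_equal_generate_list_power_minus_2 := by
  intro n _
  unfold Spec_generate_list_power_minus_2 generate_list_power_minus_2 generate_list_power_minus_2_alt
  by_cases h : n ≤ 0
  · simp [h, PySem.List.pyRange_one_eq_nil h]
  · simp only [h, if_false]
    rw [loopA_eq]
    have hlen : (PySem.List.pyRange 1 n 1).length = (n - 1).toNat :=
      PySem.List.length_pyRange_one 1 n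
    rw [hlen, PySem.List.pyRange_one 0 n]
    have hn : n.toNat = (n - 1).toNat + 1 := by omega
    have : (n - 0 : Int) = n := by ring
    rw [this, hn, List.range_succ_eq_map]
    simp [List.map_map, Function.comp, pow_succ, mul_comm]
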